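-- pv_equiv track=rewrite | github.com/wcfcarolina13/Web3_Ecosystem_Processor | lib/grid_client/support.py | check_target_support
-- ===== SOURCE A (Python) =====
-- from typing import Dict, List, Set
--
-- TARGET_ASSET_GRID_MAP = {
--     "USDT": {"USDt", "USDT", "Tether USDt", "Tether"},
--     "USDC": {"USDC", "USD Coin"},
--     "SOL": {"SOL", "Solana"},
--     "STRK": {"STRK", "Starknet"},
--     "ADA": {"ADA", "Cardano"},
-- }
--
-- def check_target_support(
--     supported_tickers: Set[str], target_assets: List[str]
-- ) -> Dict[str, bool]:
--     """
--     Check which target assets are supported based on Grid tickers.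
--     Returns {asset: True/False}.
--     """
--     result = {}
--     for asset in target_assets:
--         grid_aliases = TARGET_ASSET_GRID_MAP.get(asset, {asset})
--         found = bool(grid_aliases & supported_tickers)
--         result[asset] = found
--     return result
-- ===== SOURCE B (Python) =====
-- TARGET_ASSET_GRID_MAP = {
--     "USDT": {"USDt", "USDT", "Tether USDt", "Tether"},
--     "USDC": {"USDC", "USD Coin"},
--     "SOL": {"SOL", "Solana"},
--     "STRK": {"STRK", "Starknet"},
--     "ADA": {"ADA", "Cardano"},
-- }
--
-- _ALIAS_TO_ASSET = {
--     alias: asset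
--     for asset, aliases in TARGET_ASSET_GRID_MAP.items()
--     for alias in aliases
-- }
--
-- def check_target_support(supported_tickers, target_assets):
--     supported_assets = {
--         _ALIAS_TO_ASSET[t] for t in supported_tickers if t in _ALIAS_TO_ASSET
--     }
--     result = {}
--     for asset in target_assets:
--         if asset in TARGET_ASSET_GRID_MAP:
--             result[asset] = asset in supported_assets
--         else:
--             result[asset] = asset in supported_tickers
--     return result
-- ===== Notes on version B (the rewrite author's own statement) =====
-- stated objective: alternative
-- what changed: Instead of intersecting each asset's alias set with the tickers per asset, B precomputes a reverse alias-to-asset index once, marks the supported canonical assets in one pass over the tickers, and then answers each target asset by a single set-membership test.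
import Mathlib
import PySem

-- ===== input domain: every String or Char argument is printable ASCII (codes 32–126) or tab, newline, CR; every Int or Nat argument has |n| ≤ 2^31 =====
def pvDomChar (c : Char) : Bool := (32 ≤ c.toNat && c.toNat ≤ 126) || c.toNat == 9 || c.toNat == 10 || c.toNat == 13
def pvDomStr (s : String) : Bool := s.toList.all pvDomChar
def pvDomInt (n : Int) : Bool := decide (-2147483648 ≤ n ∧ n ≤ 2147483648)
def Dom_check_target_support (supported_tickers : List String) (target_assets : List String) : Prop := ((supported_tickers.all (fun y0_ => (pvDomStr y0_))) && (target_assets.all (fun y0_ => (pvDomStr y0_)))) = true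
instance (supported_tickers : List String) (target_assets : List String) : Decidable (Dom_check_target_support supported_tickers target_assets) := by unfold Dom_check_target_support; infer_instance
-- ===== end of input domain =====

-- B replaces A's per-asset alias-set intersection by a precomputed reverse alias→asset index
-- plus one marking pass over the tickers (alternative decomposition; same return value).

-- ===== PORT A =====
-- TARGET_ASSET_GRID_MAP: module-level constant (alias values are Python sets of distinct literals)
def targetAssetGridMap : PySem.Dict String (List String) :=
  PySem.Dict.ofList
    [("USDT", ["USDt", "USDT", "Tether USDt", "Tether"]),
     ("USDC", ["USDC", "USD Coin"]),
     ("SOL",  ["SOL", "Solana"]),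
     ("STRK", ["STRK", "Starknet"]),
     ("ADA",  ["ADA", "Cardano"])]

def check_target_support (supported_tickers : List String) (target_assets : List String) : List (String × Bool) :=
  (target_assets.foldl (fun result asset =>
      let grid_aliases := (targetAssetGridMap.get? asset).getD [asset]
      let found := !(PySem.Set.inter grid_aliases supported_tickers).isEmpty
      result.insert asset found)
    PySem.Dict.empty).items

-- ===== PORT B =====
-- _ALIAS_TO_ASSET: reverse index built once from the constant map
def aliasToAsset : PySem.Dict String String :=
  targetAssetGridMap.items.foldl
    (fun d p => p.2.foldl (fun d al => d.insert al p.1) d) PySem.Dict.empty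

def check_target_support_alt (supported_tickers : List String) (target_assets : List String) : List (String × Bool) :=
  let supported_assets : PySem.Set String :=
    supported_tickers.foldl (fun s t =>
      match aliasToAsset.get? t with
      | some a => PySem.Set.add s a
      | none => s) PySem.Set.empty
  (target_assets.foldl (fun result asset =>
      if targetAssetGridMap.contains asset then
        result.insert asset (supported_assets.contains asset)
      else
        result.insert asset (supported_tickers.contains asset))
    PySem.Dict.empty).items

-- ===== PRECONDITION & SPEC =====
def Spec_check_target_support (supported_tickers : List String) (target_assets : List String) (out : List (String × Bool)) : Prop := out = check_target_support_alt supported_tickers target_assets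
instance (supported_tickers : List String) (target_assets : List String) (out : List (String × Bool)) : Decidable (Spec_check_target_support supported_tickers target_assets out) := by unfold Spec_check_target_support; infer_instance

-- ===== CLAIM (what is proved, stated in full; the proofs are below) =====
def Claim_equal_check_target_support : Prop := ∀ (supported_tickers : List String) (target_assets : List String), Dom_check_target_support supported_tickers target_assets → Spec_check_target_support supported_tickers target_assets (check_target_support supported_tickers target_assets)

-- ===== LEMMAS AND PROOFS =====

-- membership in B's supported_assets accumulator
lemma mem_supported_assets (st : List String) (init : PySem.Set String) (a : String) :
    a ∈ st.foldl (fun s t =>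
      match aliasToAsset.get? t with
      | some x => PySem.Set.add s x
      | none => s) init ↔ a ∈ init ∨ ∃ t ∈ st, aliasToAsset.get? t = some a := by
  induction st generalizing init with
  | nil => simp
  | cons t ts ih =>
    cases h : aliasToAsset.get? t <;>
      simp only [List.foldl_cons, h, ih, PySem.Set.mem_add, List.exists_mem_cons_iff,
        Option.some.injEq, reduceCtorEq] <;> tauto

-- the reverse index looks up exactly the aliases
set_option maxHeartbeats 2000000 in
lemma aliasToAsset_get (t : String) :
    aliasToAsset.get? t =
      if t = "USDt" ∨ t = "USDT" ∨ t = "Tether USDt" ∨ t = "Tether" then some "USDT"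
      else if t = "USDC" ∨ t = "USD Coin" then some "USDC"
      else if t = "SOL" ∨ t = "Solana" then some "SOL"
      else if t = "STRK" ∨ t = "Starknet" then some "STRK"
      else if t = "ADA" ∨ t = "Cardano" then some "ADA"
      else none := by
  have h : aliasToAsset = PySem.Dict.mk
      [("USDt", "USDT"), ("USDT", "USDT"), ("Tether USDt", "USDT"), ("Tether", "USDT"),
       ("USDC", "USDC"), ("USD Coin", "USDC"),
       ("SOL", "SOL"), ("Solana", "SOL"),
       ("STRK", "STRK"), ("Starknet", "STRK"),
       ("ADA", "ADA"), ("Cardano", "ADA")] := rfl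
  rw [h]
  simp only [PySem.Dict.get?_mk_cons, beq_iff_eq]
  split_ifs <;> (try rfl) <;> (try subst_vars) <;> (try simp_all) <;> tauto

-- concrete lookup characterisations, one per canonical asset
lemma get_eq_mem_USDT (t : String) :
    aliasToAsset.get? t = some "USDT" ↔ t ∈ (["USDt", "USDT", "Tether USDt", "Tether"] : List String) := by
  rw [aliasToAsset_get]; split_ifs <;> simp_all <;> constructor <;> rintro rfl <;> simp_all
lemma get_eq_mem_USDC (t : String) :
    aliasToAsset.get? t = some "USDC" ↔ t ∈ (["USDC", "USD Coin"] : List String) := by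
  rw [aliasToAsset_get]; split_ifs <;> simp_all <;> constructor <;> rintro rfl <;> simp_all
lemma get_eq_mem_SOL (t : String) :
    aliasToAsset.get? t = some "SOL" ↔ t ∈ (["SOL", "Solana"] : List String) := by
  rw [aliasToAsset_get]; split_ifs <;> simp_all <;> constructor <;> rintro rfl <;> simp_all
lemma get_eq_mem_STRK (t : String) :
    aliasToAsset.get? t = some "STRK" ↔ t ∈ (["STRK", "Starknet"] : List String) := by
  rw [aliasToAsset_get]; split_ifs <;> simp_all <;> constructor <;> rintro rfl <;> simp_all
lemma get_eq_mem_ADA (t : String) :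
    aliasToAsset.get? t = some "ADA" ↔ t ∈ (["ADA", "Cardano"] : List String) := by
  rw [aliasToAsset_get]; split_ifs <;> simp_all <;> constructor <;> rintro rfl <;> simp_all

-- lookup in the constant map as an if-chain
lemma mapget (asset : String) : targetAssetGridMap.get? asset =
      if asset = "USDT" then some ["USDt", "USDT", "Tether USDt", "Tether"]
      else if asset = "USDC" then some ["USDC", "USD Coin"]
      else if asset = "SOL" then some ["SOL", "Solana"]
      else if asset = "STRK" then some ["STRK", "Starknet"]
      else if asset = "ADA" then some ["ADA", "Cardano"]
      else none := by
  have h : targetAssetGridMap = PySem.Dict.mk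
    [("USDT", ["USDt", "USDT", "Tether USDt", "Tether"]),
     ("USDC", ["USDC", "USD Coin"]),
     ("SOL",  ["SOL", "Solana"]),
     ("STRK", ["STRK", "Starknet"]),
     ("ADA",  ["ADA", "Cardano"])] := rfl
  rw [h]
  simp only [PySem.Dict.get?_mk_cons, beq_iff_eq]
  split_ifs <;> (try rfl) <;> (try subst_vars) <;> simp_all

lemma mapcontains (asset : String) : targetAssetGridMap.contains asset =
    (asset = "USDT" ∨ asset = "USDC" ∨ asset = "SOL" ∨ asset = "STRK" ∨ asset = "ADA" : Bool) := by
  rw [PySem.Dict.contains_eq_isSome_get?, mapget]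
  split_ifs <;> simp_all

-- a set intersection is non-empty iff some element of the first list lies in the second
lemma inter_ne (al st : List String) :
    (!(PySem.Set.inter al st).isEmpty) = true ↔ ∃ x ∈ al, x ∈ st := by
  simp only [Bool.not_eq_eq_eq_not, Bool.not_true, List.isEmpty_eq_false_iff_exists_mem,
    PySem.Set.mem_inter]

lemma exists_get_eq (st : List String) (a : String) (al : List String)
    (hch : ∀ t, aliasToAsset.get? t = some a ↔ t ∈ al) :
    (∃ t ∈ st, aliasToAsset.get? t = some a) ↔ ∃ x ∈ al, x ∈ st := by
  constructor
  · rintro ⟨t, ht, hg⟩; exact ⟨t, (hch t).mp hg, ht⟩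
  · rintro ⟨x, hx, hmem⟩; exact ⟨x, hmem, (hch x).mpr hx⟩

-- per-asset: A's intersection test equals B's membership test
lemma found_eq (st : List String) (asset : String) :
    (!(PySem.Set.inter ((targetAssetGridMap.get? asset).getD [asset]) st).isEmpty) =
      (if targetAssetGridMap.contains asset then
        PySem.Set.contains (st.foldl (fun s t =>
          match aliasToAsset.get? t with
          | some x => PySem.Set.add s x
          | none => s) PySem.Set.empty) asset
      else st.contains asset) := by
  rw [mapget, mapcontains]
  by_cases h1 : asset = "USDT"
  · subst h1
    rw [Bool.eq_iff_iff, inter_ne]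
    simp [mem_supported_assets,
      exists_get_eq st "USDT" _ get_eq_mem_USDT]
  by_cases h2 : asset = "USDC"
  · subst h2
    rw [Bool.eq_iff_iff, inter_ne]
    simp [mem_supported_assets,
      exists_get_eq st "USDC" _ get_eq_mem_USDC]
  by_cases h3 : asset = "SOL"
  · subst h3
    rw [Bool.eq_iff_iff, inter_ne]
    simp [mem_supported_assets,
      exists_get_eq st "SOL" _ get_eq_mem_SOL]
  by_cases h4 : asset = "STRK"
  · subst h4
    rw [Bool.eq_iff_iff, inter_ne]
    simp [mem_supported_assets,
      exists_get_eq st "STRK" _ get_eq_mem_STRK]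
  by_cases h5 : asset = "ADA"
  · subst h5
    rw [Bool.eq_iff_iff, inter_ne]
    simp [mem_supported_assets,
      exists_get_eq st "ADA" _ get_eq_mem_ADA]
  · rw [Bool.eq_iff_iff, inter_ne]
    simp [h1, h2, h3, h4, h5]

-- ===== VERDICT (by name: the statement is the Claim_ definition above) =====
theorem check_target_support_spec : Claim_equal_check_target_support := by
  intro st ta _
  unfold Spec_check_target_support check_target_support check_target_support_alt
  congr 1
  apply PySem.List.foldl_congr_mem
  intro acc asset _
  dsimp only
  rw [found_eq st asset]
  split_ifs <;> rfl
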